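-- pv_equiv track=rewrite | github.com/KrithikK7/Audio_watermarking | embed.py | block_deinterleave
-- ===== SOURCE A (Python) =====
-- import math
-- from typing import List, Tuple
--
-- def block_deinterleave(bits: List[int], depth: int) -> List[int]:
--     if depth <= 1: return bits
--     rows = depth; cols = math.ceil(len(bits) / rows)
--     grid = [[0]*cols for _ in range(rows)]; idx = 0
--     for c in range(cols):
--         for r in range(rows):
--             if idx < len(bits):
--                 grid[r][c] = bits[idx]; idx += 1
--     out = []
--     for r in range(rows):
--         for c in range(cols): out.append(grid[r][c])
--     return out[:len(bits)]
-- ===== SOURCE B (Python) =====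
-- def block_deinterleave(bits, depth):
--     # Direct index arithmetic: no 2D grid, one comprehension.
--     if depth <= 1:
--         return bits
--     n = len(bits)
--     rows = depth
--     cols = (n + rows - 1) // rows
--     return [bits[src] if src < n else 0
--             for src in ((k % cols) * rows + k // cols for k in range(n))]
-- ===== Notes on version B (the rewrite author's own statement) =====
-- stated objective: simpler
-- what changed: Replaces the mutable 2D grid with its column-major fill and row-major read-out by a single comprehension that computes the deinterleave permutation src=(k%cols)*rows+k//cols directly by index arithmetic.
import Mathlib
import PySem

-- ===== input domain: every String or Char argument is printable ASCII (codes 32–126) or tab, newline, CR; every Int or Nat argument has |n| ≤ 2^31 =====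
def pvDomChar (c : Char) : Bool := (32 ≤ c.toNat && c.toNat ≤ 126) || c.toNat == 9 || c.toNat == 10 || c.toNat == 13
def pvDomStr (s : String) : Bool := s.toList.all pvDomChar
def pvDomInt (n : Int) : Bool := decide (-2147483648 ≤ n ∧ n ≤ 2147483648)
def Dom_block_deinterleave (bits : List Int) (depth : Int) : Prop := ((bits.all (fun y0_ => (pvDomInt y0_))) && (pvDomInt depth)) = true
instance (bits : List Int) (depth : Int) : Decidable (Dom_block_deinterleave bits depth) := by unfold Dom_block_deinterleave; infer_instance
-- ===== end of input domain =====

-- B replaces A's mutable 2D grid (column-major fill, row-major read) by one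
-- comprehension computing the deinterleave permutation by index arithmetic (simpler).

-- ===== PORT A =====
-- math.ceil(len(bits)/rows) is exact ceiling division at these magnitudes (0 ≤ len < 2^53,
-- rows ≥ 2), ported as -((-len) // rows).  grid[r][c] = v is ported as modify/set and the
-- in-range Python index reads grid[r][c], bits[idx] as pyGetD (always in range here).
def block_deinterleave (bits : List Int) (depth : Int) : List Int :=
  if depth ≤ 1 then bits
  else
    let rows : Int := depth
    let cols : Int := -(PySem.Int.floordiv (-(bits.length : Int)) rows)
    let grid : List (List Int) := List.replicate rows.toNat (List.replicate cols.toNat 0)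
    let fill := (PySem.List.pyRange 0 cols 1).foldl (fun st c =>
      (PySem.List.pyRange 0 rows 1).foldl (fun (st : List (List Int) × Int) r =>
        if st.2 < (bits.length : Int) then
          (st.1.modify r.toNat (fun row => row.set c.toNat (PySem.List.pyGetD bits st.2 0)),
           st.2 + 1)
        else st) st) (grid, 0)
    let out := (PySem.List.pyRange 0 rows 1).foldl (fun out r =>
      (PySem.List.pyRange 0 cols 1).foldl (fun out c =>
        out ++ [PySem.List.pyGetD (PySem.List.pyGetD fill.1 r []) c 0]) out) []
    PySem.List.slice out none (some (bits.length : Int))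

-- ===== PORT B =====
def block_deinterleave_alt (bits : List Int) (depth : Int) : List Int :=
  if depth ≤ 1 then bits
  else
    let n := bits.length
    let rows := depth.toNat
    let cols := (n + rows - 1) / rows
    (List.range n).map (fun k =>
      let src := (k % cols) * rows + k / cols
      if src < n then bits.getD src 0 else 0)

-- ===== PRECONDITION & SPEC =====
def Spec_block_deinterleave (bits : List Int) (depth : Int) (out : List Int) : Prop := out = block_deinterleave_alt bits depth
instance (bits : List Int) (depth : Int) (out : List Int) : Decidable (Spec_block_deinterleave bits depth out) := by unfold Spec_block_deinterleave; infer_instance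

-- ===== CLAIM (what is proved, stated in full; the proofs are below) =====
def Claim_equal_block_deinterleave : Prop := ∀ (bits : List Int) (depth : Int), Dom_block_deinterleave bits depth → Spec_block_deinterleave bits depth (block_deinterleave bits depth)

-- ===== LEMMAS AND PROOFS =====

set_option maxHeartbeats 1000000

-- the value A's filled grid holds at row r, column c
def pvEntry (bits : List Int) (R r c : Nat) : Int :=
  if c * R + r < bits.length then bits.getD (c * R + r) 0 else 0

-- A's grid after the first t columns have been filled
def pvGridAt (bits : List Int) (R C t : Nat) : List (List Int) :=
  (List.range R).map (fun r => (List.range C).map (fun c =>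
    if c < t ∧ c * R + r < bits.length then bits.getD (c * R + r) 0 else 0))

-- A's grid after the first j rows of column c have been processed, starting from g
def pvColSet (bits : List Int) (R : Nat) (g : List (List Int)) (c j : Nat) : List (List Int) :=
  g.mapIdx (fun r row =>
    if r < j ∧ c * R + r < bits.length then row.set c (bits.getD (c * R + r) 0) else row)

theorem pvColSet_zero (bits : List Int) (R : Nat) (g : List (List Int)) (c : Nat) :
    pvColSet bits R g c 0 = g := by
  apply List.ext_getElem
  · simp [pvColSet]
  · intro i h1 h2
    simp [pvColSet, List.getElem_mapIdx]

theorem pv_inner (bits : List Int) (R c : Nat) (g : List (List Int)) (j : Nat) :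
    (List.range j).foldl (fun (st : List (List Int) × Int) (r : Nat) =>
        if st.2 < (bits.length : Int) then
          (st.1.modify r (fun row => row.set c (PySem.List.pyGetD bits st.2 0)), st.2 + 1)
        else st) (g, ((min (c * R) bits.length : Nat) : Int))
      = (pvColSet bits R g c j, ((min (c * R + j) bits.length : Nat) : Int)) := by
  induction j with
  | zero => simp [pvColSet_zero]
  | succ j ih =>
    rw [List.range_succ, List.foldl_append, ih]
    simp only [List.foldl_cons, List.foldl_nil]
    by_cases h : c * R + j < bits.length
    · have hmin : min (c * R + j) bits.length = c * R + j := by omega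
      have hcond : ((min (c * R + j) bits.length : Nat) : Int) < (bits.length : Int) := by
        rw [hmin]; exact_mod_cast h
      rw [if_pos hcond]
      have hmin' : min (c * R + (j + 1)) bits.length = c * R + j + 1 := by omega
      simp only [Prod.mk.injEq]
      constructor
      · rw [hmin, PySem.List.pyGetD_natCast]
        apply List.ext_getElem
        · simp [pvColSet]
        · intro i h1 h2
          rw [List.getElem_modify]
          simp only [pvColSet, List.getElem_mapIdx]
          by_cases hij : j = i
          · subst hij
            simp [h]
          · have hiff : (i < j + 1 ∧ c * R + i < bits.length) ↔ (i < j ∧ c * R + i < bits.length) := by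
              constructor <;> rintro ⟨h3, h4⟩ <;> exact ⟨by omega, h4⟩
            rw [if_neg hij]
            simp only [hiff]
      · rw [hmin, hmin']; push_cast; ring
    · have hmin : min (c * R + j) bits.length = bits.length := by omega
      have hcond : ¬ ((min (c * R + j) bits.length : Nat) : Int) < (bits.length : Int) := by
        rw [hmin]; omega
      rw [if_neg hcond]
      simp only [Prod.mk.injEq]
      constructor
      · apply List.ext_getElem
        · simp [pvColSet]
        · intro i h1 h2
          simp only [pvColSet, List.getElem_mapIdx]
          have hiff : (i < j + 1 ∧ c * R + i < bits.length) ↔ (i < j ∧ c * R + i < bits.length) := by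
            constructor <;> rintro ⟨h3, h4⟩ <;> exact ⟨by omega, h4⟩
          simp only [hiff]
      · rw [hmin, show min (c * R + (j + 1)) bits.length = bits.length from by omega]

theorem pv_colSet_gridAt (bits : List Int) (R C t : Nat) :
    pvColSet bits R (pvGridAt bits R C t) t R = pvGridAt bits R C (t + 1) := by
  apply List.ext_getElem
  · simp [pvColSet, pvGridAt]
  · intro r h1 h2
    have hr : r < R := by
      have := h1
      simpa [pvColSet, pvGridAt] using this
    simp only [pvColSet, pvGridAt, List.getElem_mapIdx, List.getElem_map, List.getElem_range]
    by_cases h : t * R + r < bits.length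
    · rw [if_pos ⟨hr, h⟩]
      apply List.ext_getElem
      · simp
      · intro i hc1 hc2
        rw [List.getElem_set]
        simp only [List.getElem_map, List.getElem_range]
        by_cases hct : t = i
        · subst hct
          simp [h]
        · have hiff : (i < t + 1 ∧ i * R + r < bits.length) ↔ (i < t ∧ i * R + r < bits.length) := by
            constructor <;> rintro ⟨h3, h4⟩ <;> exact ⟨by omega, h4⟩
          rw [if_neg hct]
          simp only [hiff]
    · rw [if_neg (by rintro ⟨_, h4⟩; exact h h4)]
      apply List.map_congr_left
      intro i _
      have hiff : (i < t + 1 ∧ i * R + r < bits.length) ↔ (i < t ∧ i * R + r < bits.length) := by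
        constructor <;> rintro ⟨h3, h4⟩ <;> refine ⟨?_, h4⟩
        · rcases Nat.lt_or_ge i t with h5 | h5
          · omega
          · exfalso
            have : i = t := by omega
            subst this
            exact h h4
        · omega
      simp only [hiff]

theorem pv_outer (bits : List Int) (R C : Nat) (t : Nat) :
    (List.range t).foldl (fun (st : List (List Int) × Int) (c : Nat) =>
        (List.range R).foldl (fun (st : List (List Int) × Int) (r : Nat) =>
          if st.2 < (bits.length : Int) then
            (st.1.modify r (fun row => row.set c (PySem.List.pyGetD bits st.2 0)), st.2 + 1)
          else st) st) (pvGridAt bits R C 0, 0)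
      = (pvGridAt bits R C t, ((min (t * R) bits.length : Nat) : Int)) := by
  induction t with
  | zero => simp
  | succ t ih =>
    rw [List.range_succ, List.foldl_append, ih]
    simp only [List.foldl_cons, List.foldl_nil]
    rw [pv_inner bits R t (pvGridAt bits R C t) R, pv_colSet_gridAt]
    rw [show t * R + R = (t + 1) * R from by ring]

theorem pv_flat (f : Nat → Nat → Int) (R C : Nat) (hC : 0 < C) :
    (List.range R).flatMap (fun r => (List.range C).map (fun c => f r c))
      = (List.range (R * C)).map (fun k => f (k / C) (k % C)) := by
  induction R with
  | zero => simp
  | succ R ih =>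
    rw [List.range_succ, List.flatMap_append, ih]
    rw [show (R + 1) * C = R * C + C from by ring, List.range_add, List.map_append]
    congr 1
    simp only [List.flatMap_cons, List.flatMap_nil, List.append_nil, List.map_map]
    apply List.map_congr_left
    intro c hc
    have hcC : c < C := List.mem_range.mp hc
    have h1 : (R * C + c) / C = R := by
      rw [Nat.mul_comm R C, Nat.mul_add_div hC, Nat.div_eq_of_lt hcC]
      omega
    have h2 : (R * C + c) % C = c := by
      rw [Nat.mul_comm R C, Nat.mul_add_mod, Nat.mod_eq_of_lt hcC]
    simp [h1, h2]

-- the read-out loops produce the flattened grid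
theorem pv_read (bits : List Int) (R C : Nat) :
    (List.range R).foldl (fun (out : List Int) (r : Nat) =>
        (List.range C).foldl (fun (out : List Int) (c : Nat) =>
          out ++ [PySem.List.pyGetD (PySem.List.pyGetD (pvGridAt bits R C C) ((r : Nat) : Int) []) ((c : Nat) : Int) 0]) out) []
      = (List.range R).flatMap (fun r => (List.range C).map (fun c => pvEntry bits R r c)) := by
  have hrow : ∀ r < R, PySem.List.pyGetD (pvGridAt bits R C C) ((r : Nat) : Int) []
      = (List.range C).map (fun c => pvEntry bits R r c) := by
    intro r hr
    rw [PySem.List.pyGetD_natCast]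
    have h1 : (pvGridAt bits R C C).getD r []
        = (List.range C).map (fun c => if c < C ∧ c * R + r < bits.length then bits.getD (c * R + r) 0 else 0) := by
      simp [pvGridAt, List.getD_eq_getElem?_getD, List.getElem?_map, List.getElem?_range hr]
    rw [h1]
    apply List.map_congr_left
    intro c hc
    have hcC : c < C := List.mem_range.mp hc
    simp [pvEntry, hcC]
  calc (List.range R).foldl (fun (out : List Int) (r : Nat) =>
        (List.range C).foldl (fun (out : List Int) (c : Nat) =>
          out ++ [PySem.List.pyGetD (PySem.List.pyGetD (pvGridAt bits R C C) ((r : Nat) : Int) []) ((c : Nat) : Int) 0]) out) []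
      = (List.range R).foldl (fun (out : List Int) (r : Nat) =>
          out ++ (List.range C).map (fun c => pvEntry bits R r c)) [] := by
        apply PySem.List.foldl_congr_mem
        intro acc r hr
        rw [PySem.List.foldl_append_singleton_eq_map]
        congr 1
        apply List.map_congr_left
        intro c hc
        have hcC : c < C := List.mem_range.mp hc
        rw [hrow r (List.mem_range.mp hr), PySem.List.pyGetD_natCast]
        simp [List.getD_eq_getElem?_getD, List.getElem?_map, List.getElem?_range hcC]
    _ = _ := by
        rw [PySem.List.foldl_append_eq_flatMap]
        simp

theorem pv_main (bits : List Int) (depth : Int) :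
    block_deinterleave bits depth = block_deinterleave_alt bits depth := by
  by_cases hd : depth ≤ 1
  · simp [block_deinterleave, block_deinterleave_alt, hd]
  · obtain ⟨R, hRdep⟩ : ∃ R : Nat, depth = (R : Int) := ⟨depth.toNat, by omega⟩
    have hR2 : 2 ≤ R := by omega
    set C := (bits.length + R - 1) / R with hC
    have hdm0 := Nat.div_add_mod (bits.length + R - 1) R
    rw [← hC] at hdm0
    have hm0 : (bits.length + R - 1) % R < R := Nat.mod_lt _ (by omega)
    zify [show 1 ≤ bits.length + R from by omega] at hdm0 hm0
    have hmnn : (0 : Int) ≤ ((bits.length : Int) + (R : Int) - 1) % (R : Int) :=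
      Int.emod_nonneg _ (by omega)
    have hleI : (bits.length : Int) ≤ (C : Int) * (R : Int) := by linarith
    have hCRn : bits.length ≤ C * R := by exact_mod_cast hleI
    have hRpos : (0 : Int) < (R : Int) := by omega
    have hcols : -(PySem.Int.floordiv (-(bits.length : Int)) ((R : Nat) : Int)) = (C : Int) := by
      rw [PySem.Int.neg_floordiv_neg_eq_iff_of_pos hRpos]
      rcases Nat.eq_zero_or_pos bits.length with h0 | hpos
      · have hC0 : C = 0 := by rw [hC, h0]; exact Nat.div_eq_of_lt (by omega)
        rw [h0, hC0]
        constructor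
        · rw [show ((0 : Nat) : Int) - 1 = -1 from by norm_num,
            show (-1 : Int) * (R : Int) = -(R : Int) from by ring]
          omega
        · simp
      · have hpos' : (0 : Int) < (bits.length : Int) := by exact_mod_cast hpos
        constructor
        · linarith
        · exact hleI
    rw [block_deinterleave, if_neg hd]
    simp only [hRdep, hcols, PySem.List.pyRange_zero_natCast, List.foldl_map, Int.toNat_natCast]
    have hg0 : pvGridAt bits R C 0 = List.replicate R (List.replicate C (0 : Int)) := by
      simp [pvGridAt, List.map_const']
    rw [← hg0, pv_outer bits R C C]
    dsimp only
    rw [pv_read bits R C]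
    rcases Nat.eq_zero_or_pos bits.length with h0 | hpos
    · have hC0 : C = 0 := by rw [hC, h0]; exact Nat.div_eq_of_lt (by omega)
      rw [PySem.List.slice_to_natCast]
      rw [block_deinterleave_alt, if_neg (show ¬((R : Nat) : Int) ≤ 1 from by omega)]
      simp [h0, hC0]
    · have hCpos : 0 < C := by
        rcases Nat.eq_zero_or_pos C with hc0 | hc
        · exfalso
          have h' : bits.length ≤ 0 := by
            have h'' := hCRn
            rw [hc0, Nat.zero_mul] at h''
            exact h''
          omega
        · exact hc
      rw [pv_flat (fun r c => pvEntry bits R r c) R C hCpos]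
      rw [PySem.List.slice_to_natCast, ← List.map_take, List.take_range]
      rw [min_eq_left (by rw [Nat.mul_comm]; exact hCRn)]
      rw [block_deinterleave_alt, if_neg (show ¬((R : Nat) : Int) ≤ 1 from by omega)]
      simp only [Int.toNat_natCast, ← hC]
      apply List.map_congr_left
      intro k _
      simp [pvEntry]

-- ===== VERDICT (by name: the statement is the Claim_ definition above) =====
theorem block_deinterleave_spec : Claim_equal_block_deinterleave := by
  intro bits depth _
  show block_deinterleave bits depth = block_deinterleave_alt bits depth
  exact pv_main bits depth
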